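-- pv_equiv track=rewrite | github.com/Dongwoo-Gang/sw-using-wu | tdafunction.py | sum_cocycles
-- ===== SOURCE A (Python) =====
-- def sum_cocycles(cocycles):
--     '''input : [cocycle1,cocycle2,...]. out : cocycle1+cocycle2+...'''
--     out = []
--     for cocycle in cocycles:
--         for spx in cocycle:
--             if spx in out:
--                 out.remove(spx)
--             else:
--                 out.append(spx)
--     return out
-- ===== SOURCE B (Python) =====
-- def sum_cocycles(cocycles):
--     '''input : [cocycle1,cocycle2,...]. out : cocycle1+cocycle2+...'''
--     stream = [spx for cocycle in cocycles for spx in cocycle]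
--     count = {}
--     for spx in stream:
--         count[spx] = count.get(spx, 0) + 1
--     out = []
--     seen = set()
--     for spx in reversed(stream):
--         if spx not in seen:
--             seen.add(spx)
--             if count[spx] % 2 == 1:
--                 out.append(spx)
--     out.reverse()
--     return out
-- ===== Notes on version B (the rewrite author's own statement) =====
-- stated objective: faster
-- what changed: Replaces the quadratic toggle list (membership scan + remove per element) with one counting pass over the flattened stream plus one reverse scan that emits each odd-count element at its last occurrence.
import Mathlib
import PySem

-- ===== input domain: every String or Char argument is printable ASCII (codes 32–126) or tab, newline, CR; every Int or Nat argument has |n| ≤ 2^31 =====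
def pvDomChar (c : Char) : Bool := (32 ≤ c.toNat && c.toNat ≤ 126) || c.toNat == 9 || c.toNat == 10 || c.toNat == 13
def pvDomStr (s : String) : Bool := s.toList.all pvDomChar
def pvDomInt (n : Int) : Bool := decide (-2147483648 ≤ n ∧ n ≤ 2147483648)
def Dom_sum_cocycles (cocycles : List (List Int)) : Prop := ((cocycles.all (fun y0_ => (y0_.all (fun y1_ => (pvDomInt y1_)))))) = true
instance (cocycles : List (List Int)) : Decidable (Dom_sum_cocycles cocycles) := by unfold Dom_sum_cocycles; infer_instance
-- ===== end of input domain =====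

-- B replaces A's quadratic toggle list with a counting pass plus a reverse scan
-- emitting odd-count elements at their last occurrence (same return value, O(n)).

-- ===== PORT A =====
-- 'spx in out' / 'out.remove(spx)': remove of a present element = erase of first occurrence.
def sum_cocycles (cocycles : List (List Int)) : List Int :=
  cocycles.foldl
    (fun out cocycle =>
      cocycle.foldl
        (fun out spx => if out.contains spx then out.erase spx else out ++ [spx]) out)
    []

-- ===== PORT B =====
def sum_cocycles_alt (cocycles : List (List Int)) : List Int :=
  let stream := cocycles.flatMap (fun cocycle => cocycle)
  let count := stream.foldl (fun d spx => d.insert spx (d.getD spx 0 + 1)) PySem.Dict.empty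
  let st := stream.reverse.foldl
    (fun (st : List Int × PySem.Set Int) spx =>
      if PySem.Set.contains st.2 spx then st
      else (if PySem.Int.mod (count.getD spx 0) 2 == 1 then st.1 ++ [spx] else st.1,
            PySem.Set.add st.2 spx))
    ([], PySem.Set.empty)
  st.1.reverse

-- ===== PRECONDITION & SPEC =====
def Spec_sum_cocycles (cocycles : List (List Int)) (out : List Int) : Prop := out = sum_cocycles_alt cocycles
instance (cocycles : List (List Int)) (out : List Int) : Decidable (Spec_sum_cocycles cocycles out) := by unfold Spec_sum_cocycles; infer_instance

-- ===== CLAIM (what is proved, stated in full; the proofs are below) =====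
def Claim_equal_sum_cocycles : Prop := ∀ (cocycles : List (List Int)), Dom_sum_cocycles cocycles → Spec_sum_cocycles cocycles (sum_cocycles cocycles)

-- ===== LEMMAS AND PROOFS =====

-- A's toggle step and its fold over the flattened stream.
def tStep (out : List Int) (spx : Int) : List Int :=
  if out.contains spx then out.erase spx else out ++ [spx]

def tFold (s : List Int) : List Int := s.foldl tStep []

-- Emitted list of B's reverse scan, seen-set and odd-test abstracted.
def emitR (p : Int → Bool) : List Int → PySem.Set Int → List Int
  | [], _ => []
  | y :: rs, seen =>
      if PySem.Set.contains seen y then emitR p rs seen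
      else (if p y then [y] else []) ++ emitR p rs (PySem.Set.add seen y)

theorem sum_cocycles_eq_tFold (cocycles : List (List Int)) :
    sum_cocycles cocycles = tFold (cocycles.flatMap (fun c => c)) := by
  unfold sum_cocycles tFold
  have h : (cocycles.flatMap (fun c => c)) = cocycles.flatten := by simp
  rw [h, List.foldl_flatten]
  rfl

theorem emitR_nil (p : Int → Bool) (seen : PySem.Set Int) : emitR p [] seen = [] := rfl

theorem emitR_cons (p : Int → Bool) (y : Int) (rs : List Int) (seen : PySem.Set Int) :
    emitR p (y :: rs) seen =
      if y ∈ seen then emitR p rs seen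
      else (if p y then [y] else []) ++ emitR p rs (PySem.Set.add seen y) := by
  simp only [emitR, PySem.Set.contains_eq_listContains, List.contains_eq_mem, decide_eq_true_eq]

theorem foldl_scan_eq_emitR (p : Int → Bool) (rs : List Int)
    (out : List Int) (seen : PySem.Set Int) :
    (rs.foldl
      (fun (st : List Int × PySem.Set Int) spx =>
        if PySem.Set.contains st.2 spx then st
        else (if p spx then st.1 ++ [spx] else st.1, PySem.Set.add st.2 spx))
      (out, seen)).1
    = out ++ emitR p rs seen := by
  induction rs generalizing out seen with
  | nil => simp [emitR_nil]
  | cons y rs ih =>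
      rw [List.foldl_cons, emitR_cons]
      by_cases h : y ∈ seen
      · rw [if_pos (by simpa [PySem.Set.contains_eq_listContains, List.contains_eq_mem] using h),
          if_pos h]
        exact ih out seen
      · rw [if_neg (by simpa [PySem.Set.contains_eq_listContains, List.contains_eq_mem] using h),
          if_neg h]
        rcases hp : p y with _ | _
        · rw [if_neg (by simp [hp]), if_neg (by simp [hp]), ih, List.nil_append]
        · rw [if_pos (by simp [hp]), if_pos (by simp [hp]), ih]
          simp

theorem emitR_congr_contains (p : Int → Bool) (rs : List Int) (s t : PySem.Set Int)
    (h : ∀ z, z ∈ s ↔ z ∈ t) :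
    emitR p rs s = emitR p rs t := by
  induction rs generalizing s t with
  | nil => simp [emitR_nil]
  | cons y rs ih =>
      rw [emitR_cons, emitR_cons]
      by_cases hy : y ∈ t
      · rw [if_pos ((h y).mpr hy), if_pos hy]
        exact ih s t h
      · rw [if_neg (fun hc => hy ((h y).mp hc)), if_neg hy]
        have hadd : ∀ z, z ∈ PySem.Set.add s y ↔ z ∈ PySem.Set.add t y := by
          intro z
          rw [PySem.Set.mem_add, PySem.Set.mem_add, h z]
        rw [ih _ _ hadd]

theorem emitR_congr_p (p q : Int → Bool) (rs : List Int) (s : PySem.Set Int)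
    (h : ∀ z, z ∉ s → p z = q z) :
    emitR p rs s = emitR q rs s := by
  induction rs generalizing s with
  | nil => simp [emitR_nil]
  | cons y rs ih =>
      rw [emitR_cons, emitR_cons]
      by_cases hy : y ∈ s
      · rw [if_pos hy, if_pos hy]
        exact ih s h
      · rw [if_neg hy, if_neg hy, h y hy]
        have hnext : ∀ z, z ∉ PySem.Set.add s y → p z = q z := by
          intro z hz
          exact h z (fun hmem => hz (by rw [PySem.Set.mem_add]; exact Or.inl hmem))
        rw [ih _ hnext]

theorem not_mem_emitR (p : Int → Bool) (rs : List Int) (s : PySem.Set Int)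
    (z : Int) (h : z ∈ s) : z ∉ emitR p rs s := by
  induction rs generalizing s with
  | nil => simp [emitR_nil]
  | cons y rs ih =>
      rw [emitR_cons]
      by_cases hy : y ∈ s
      · rw [if_pos hy]; exact ih s h
      · rw [if_neg hy]
        intro hmem
        rcases List.mem_append.mp hmem with hl | hr
        · have hzy : z = y := by
            rcases hp : p y with _ | _ <;> rw [hp] at hl <;> simp at hl
            exact hl
          exact hy (hzy ▸ h)
        · exact ih _ (by rw [PySem.Set.mem_add]; exact Or.inl h) hr

theorem emitR_add (p : Int → Bool) (rs : List Int) (s : PySem.Set Int) (x : Int) :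
    emitR p rs (PySem.Set.add s x) = (emitR p rs s).filter (fun z => z ≠ x) := by
  induction rs generalizing s with
  | nil => simp [emitR_nil]
  | cons y rs ih =>
      rw [emitR_cons, emitR_cons]
      by_cases hy : y ∈ s
      · rw [if_pos (by rw [PySem.Set.mem_add]; exact Or.inl hy), if_pos hy]
        exact ih s
      · by_cases hyx : y = x
        · subst hyx
          rw [if_pos (by rw [PySem.Set.mem_add]; exact Or.inr rfl), if_neg hy,
            List.filter_append]
          have h1 : List.filter (fun z => z ≠ y) (if p y then [y] else []) = [] := by
            rcases hp : p y with _ | _ <;> simp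
          have h2 : List.filter (fun z => z ≠ y) (emitR p rs (PySem.Set.add s y))
              = emitR p rs (PySem.Set.add s y) := by
            apply List.filter_eq_self.mpr
            intro a ha
            have hne : a ≠ y := by
              intro hay
              exact not_mem_emitR p rs (PySem.Set.add s y) a
                (by rw [PySem.Set.mem_add]; exact Or.inr hay) ha
            simp [hne]
          rw [h1, h2, List.nil_append]
        · rw [if_neg (by rw [PySem.Set.mem_add]; rintro (h | h); exacts [hy h, hyx h]), if_neg hy,
            List.filter_append]
          have h1 : List.filter (fun z => z ≠ x) (if p y then [y] else [])
              = (if p y then [y] else []) := by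
            rcases hp : p y with _ | _ <;> simp [hyx]
          rw [h1]
          have hswap : emitR p rs (PySem.Set.add (PySem.Set.add s x) y)
              = emitR p rs (PySem.Set.add (PySem.Set.add s y) x) := by
            apply emitR_congr_contains
            intro z
            rw [PySem.Set.mem_add, PySem.Set.mem_add, PySem.Set.mem_add, PySem.Set.mem_add]
            tauto
          rw [hswap, ih]

theorem tFold_append (s : List Int) (x : Int) :
    tFold (s ++ [x]) = tStep (tFold s) x := by
  unfold tFold
  rw [List.foldl_append]
  rfl

theorem nodup_tFold (s : List Int) : (tFold s).Nodup := by
  induction s using List.reverseRecOn with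
  | nil => simp [tFold]
  | append_singleton s y ih =>
      rw [tFold_append]
      unfold tStep
      by_cases hy : y ∈ tFold s
      · rw [if_pos (by simpa [List.contains_eq_mem] using hy)]
        exact ih.erase y
      · rw [if_neg (by simpa [List.contains_eq_mem] using hy)]
        rw [List.nodup_append]
        exact ⟨ih, List.nodup_singleton y, by
          intro a ha b hb
          rw [List.mem_singleton] at hb
          subst hb
          exact fun h => hy (h ▸ ha)⟩

theorem mem_tFold (s : List Int) (x : Int) : x ∈ tFold s ↔ s.count x % 2 = 1 := by
  induction s using List.reverseRecOn with
  | nil => simp [tFold]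
  | append_singleton s y ih =>
      rw [tFold_append, List.count_append]
      unfold tStep
      by_cases hy : y ∈ tFold s
      · rw [if_pos (by simpa [List.contains_eq_mem] using hy)]
        by_cases hxy : x = y
        · subst hxy
          have hodd : s.count x % 2 = 1 := ih.mp hy
          have hne : x ∉ (tFold s).erase x := (nodup_tFold s).not_mem_erase
          have h1 : List.count x [x] = 1 := by simp
          rw [h1]
          constructor
          · intro hmem; exact absurd hmem hne
          · intro hc; omega
        · have hxmem : x ∈ (tFold s).erase y ↔ x ∈ tFold s :=
            List.mem_erase_of_ne hxy
          rw [hxmem, ih]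
          have h0 : List.count x [y] = 0 := by
            rw [List.count_singleton]
            simp [Ne.symm hxy]
          omega
      · rw [if_neg (by simpa [List.contains_eq_mem] using hy)]
        rw [List.mem_append, List.mem_singleton]
        by_cases hxy : x = y
        · subst hxy
          have heven : ¬ s.count x % 2 = 1 := fun hc => hy (ih.mpr hc)
          have h1 : List.count x [x] = 1 := by simp
          rw [h1]
          constructor
          · intro _; omega
          · intro _; exact Or.inr rfl
        · have h0 : List.count x [y] = 0 := by
            rw [List.count_singleton]
            simp [Ne.symm hxy]
          rw [h0, ih]
          constructor
          · rintro (h | h)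
            · omega
            · exact absurd h hxy
          · intro h
            exact Or.inl (by omega)

theorem emitR_reverse_eq (s : List Int) (p : Int → Bool)
    (hp : ∀ z, p z = decide (s.count z % 2 = 1)) :
    emitR p s.reverse PySem.Set.empty = (tFold s).reverse := by
  induction s using List.reverseRecOn generalizing p with
  | nil => simp [tFold, emitR_nil]
  | append_singleton s x ih =>
      rw [List.reverse_append, List.reverse_singleton, List.singleton_append, emitR_cons]
      rw [if_neg (by simp [PySem.Set.empty])]
      have hq : ∀ z, z ∉ PySem.Set.add PySem.Set.empty x →
          p z = decide (s.count z % 2 = 1) := by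
        intro z hz
        have hzx : z ≠ x := by
          intro h; exact hz (by rw [PySem.Set.mem_add]; exact Or.inr h)
        rw [hp z, List.count_append]
        have h0 : List.count z [x] = 0 := by
          rw [List.count_singleton]
          simp [Ne.symm hzx]
        rw [h0]
        norm_num
      have hcx : List.count x (s ++ [x]) = s.count x + 1 := by
        rw [List.count_append]
        simp
      rw [emitR_congr_p p (fun z => decide (s.count z % 2 = 1)) _ _ hq,
        emitR_add, ih (fun z => decide (s.count z % 2 = 1)) (fun z => rfl),
        tFold_append]
      unfold tStep
      by_cases hx : x ∈ tFold s
      · have hodd : s.count x % 2 = 1 := (mem_tFold s x).mp hx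
        have hpx : p x = false := by
          rw [hp x, hcx]
          simp only [decide_eq_false_iff_not]
          omega
        rw [if_neg (show ¬ (p x = true) by simp [hpx]),
          if_pos (show (tFold s).contains x = true by simpa [List.contains_eq_mem] using hx),
          List.nil_append]
        have hfc : List.filter (fun z => decide (z ≠ x)) ((tFold s).reverse)
            = List.filter (fun z => z != x) ((tFold s).reverse) :=
          List.filter_congr (fun a _ => by cases h : a == x <;> simp_all [bne, decide_not])
        rw [hfc, List.filter_reverse, (nodup_tFold s).erase_eq_filter x]
      · have heven : ¬ s.count x % 2 = 1 := fun hc => hx ((mem_tFold s x).mpr hc)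
        have hpx : p x = true := by
          rw [hp x, hcx]
          simp only [decide_eq_true_eq]
          omega
        rw [if_pos hpx,
          if_neg (show ¬ ((tFold s).contains x = true) by simpa [List.contains_eq_mem] using hx)]
        have hfil : List.filter (fun z => decide (z ≠ x)) ((tFold s).reverse)
            = (tFold s).reverse := by
          apply List.filter_eq_self.mpr
          intro a ha
          have hax : a ≠ x := fun h => hx (h ▸ (List.mem_reverse.mp ha))
          simp [hax]
        rw [hfil, List.reverse_append, List.reverse_singleton, List.singleton_append]

-- ===== VERDICT (by name: the statement is the Claim_ definition above) =====
theorem sum_cocycles_spec : Claim_equal_sum_cocycles := by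
  intro cocycles _
  unfold Spec_sum_cocycles
  rw [sum_cocycles_eq_tFold]
  simp only [sum_cocycles_alt]
  rw [PySem.Dict.foldl_insert_getD_add_one_eq_counter]
  rw [foldl_scan_eq_emitR
    (fun spx => PySem.Int.mod ((PySem.Dict.counter (cocycles.flatMap (fun c => c))).getD spx 0) 2 == 1)
    (cocycles.flatMap (fun c => c)).reverse [] PySem.Set.empty]
  rw [List.nil_append]
  rw [emitR_reverse_eq]
  · rw [List.reverse_reverse]
  · intro z
    rw [PySem.Dict.getD_counter]
    rw [PySem.Int.mod_eq_emod_of_pos (by norm_num)]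
    rcases Nat.mod_two_eq_zero_or_one ((cocycles.flatMap (fun c => c)).count z) with h | h
    · have : ((cocycles.flatMap (fun c => c)).count z : Int) % 2 = 0 := by
        omega
      rw [this, h]
      simp
    · have : ((cocycles.flatMap (fun c => c)).count z : Int) % 2 = 1 := by
        omega
      rw [this, h]
      simp
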